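-- pv_equiv track=rewrite | github.com/rjames187/Leetcode-solutions | basicRecursionProblems.py | endX
-- ===== SOURCE A (Python) =====
-- def endX(str):
--     if len(str) < 2:
--         return str
--     elif len(str) == 2:
--         if str[0] == 'x':
--             return str[1] + str[0]
--         else:
--             return str
--     else:
--         if str[0] == 'x':
--             return endX(str[1:]) + 'x'
--         else:
--             return str[0] + endX(str[1:])
-- ===== SOURCE B (Python) =====
-- def endX(str):
--     kept = []
--     xs = 0
--     for c in str:
--         if c != 'x':
--             kept.append(c)
--         else:
--             xs += 1
--     return ''.join(kept) + 'x' * xs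
-- ===== Notes on version B (the rewrite author's own statement) =====
-- stated objective: faster
-- what changed: Replaced A's front-peeling recursion (which rebuilds a slice of the string at every step) by one iterative pass that accumulates the kept characters in a list and counts the moved characters, then joins once.
import Mathlib
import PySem

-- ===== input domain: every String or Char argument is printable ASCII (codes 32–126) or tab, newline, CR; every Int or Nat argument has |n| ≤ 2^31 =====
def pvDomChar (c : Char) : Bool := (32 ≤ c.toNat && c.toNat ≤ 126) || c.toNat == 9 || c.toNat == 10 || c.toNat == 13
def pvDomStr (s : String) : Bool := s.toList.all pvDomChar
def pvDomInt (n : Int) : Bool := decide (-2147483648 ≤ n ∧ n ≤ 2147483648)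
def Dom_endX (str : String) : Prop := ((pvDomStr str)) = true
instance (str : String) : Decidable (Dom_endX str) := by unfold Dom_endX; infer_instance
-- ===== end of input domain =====

-- B replaces A's front-peeling recursion by one iterative pass accumulating kept chars and an 'x' count (simpler decomposition).

-- ===== PORT A =====
-- A's recursion, transliterated over the character list (str[1:] = the tail, '+' = append).
def endXA : List Char → List Char
  | [] => []                                    -- len < 2
  | [c] => [c]                                  -- len < 2
  | [c1, c2] => if c1 = 'x' then [c2, c1] else [c1, c2]   -- len == 2
  | c :: rest => if c = 'x' then endXA rest ++ ['x'] else c :: endXA rest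

def endX (str : String) : String := String.ofList (endXA str.toList)

-- ===== PORT B =====
-- B's single loop: state (kept, xs); append non-'x' chars, count 'x's; then join and pad.
def endX_alt (str : String) : String :=
  let st := str.toList.foldl
    (fun (acc : List Char × Nat) c =>
      if c ≠ 'x' then (acc.1 ++ [c], acc.2) else (acc.1, acc.2 + 1))
    ([], 0)
  String.ofList (st.1 ++ List.replicate st.2 'x')

-- ===== PRECONDITION & SPEC =====
def Spec_endX (str : String) (out : String) : Prop := out = endX_alt str
instance (str : String) (out : String) : Decidable (Spec_endX str out) := by unfold Spec_endX; infer_instance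

-- ===== CLAIM (what is proved, stated in full; the proofs are below) =====
def Claim_equal_endX : Prop := ∀ (str : String), Dom_endX str → Spec_endX str (endX str)

-- ===== LEMMAS AND PROOFS =====

-- Both sides equal: non-'x' chars in order, then the 'x's.
theorem endXA_eq (l : List Char) :
    endXA l = l.filter (fun c => c ≠ 'x') ++ List.replicate (l.count 'x') 'x' := by
  induction l using endXA.induct <;>
    simp_all [endXA, List.replicate_succ', List.count_cons, List.filter_cons] <;>
    split_ifs <;> simp_all [List.replicate]

theorem foldB (l : List Char) (kept : List Char) (xs : Nat) :
    l.foldl (fun (acc : List Char × Nat) c =>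
        if c ≠ 'x' then (acc.1 ++ [c], acc.2) else (acc.1, acc.2 + 1)) (kept, xs)
      = (kept ++ l.filter (fun c => c ≠ 'x'), xs + l.count 'x') := by
  induction l generalizing kept xs with
  | nil => simp
  | cons c t ih =>
      by_cases hc : c = 'x'
      · rw [List.foldl_cons, if_neg (by simp [hc]), ih]
        simp [hc]
        omega
      · rw [List.foldl_cons, if_pos (by simp [hc]), ih]
        simp [hc]

-- ===== VERDICT (by name: the statement is the Claim_ definition above) =====
theorem endX_spec : Claim_equal_endX := by
  intro s _
  show String.ofList (endXA s.toList) = _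
  unfold endX_alt
  rw [foldB, endXA_eq]
  simp
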